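-- pv_equiv track=rewrite | github.com/pavithrapoongavanam03/securin-project | app.py | comba
-- ===== SOURCE A (Python) =====
-- def comba(arr, sides):
--     res= []
--     n = len(arr)
--     for i in range(int(n ** sides)):
--         temp = []
--         t = i
--         for j in range(sides):
--             ind = t % n
--             temp.append(arr[ind])
--             t //= n
--         res.append(temp)
--     return res
-- ===== SOURCE B (Python) =====
-- def comba(arr, sides):
--     # build the product layer by layer: each round prepends one more
--     # (fastest-cycling) digit, matching A's least-significant-first order
--     res = [[]]
--     for _ in range(sides):
--         res = [[x] + seq for seq in res for x in arr]
--     return res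
-- ===== Notes on version B (the rewrite author's own statement) =====
-- stated objective: simpler
-- what changed: B builds the Cartesian product layer by layer with a comprehension (prepending the next fastest-cycling digit each round) instead of decoding each index i of range(n**sides) into base-n digits with % and //.
-- outside the precondition, e.g. on comba([1, 2], -1): A returns [], B returns [[]]; on comba([5], -2): A returns [[]], B returns [[]]; on comba([], -1): A raises ZeroDivisionError, B returns [[]]
import Mathlib
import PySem

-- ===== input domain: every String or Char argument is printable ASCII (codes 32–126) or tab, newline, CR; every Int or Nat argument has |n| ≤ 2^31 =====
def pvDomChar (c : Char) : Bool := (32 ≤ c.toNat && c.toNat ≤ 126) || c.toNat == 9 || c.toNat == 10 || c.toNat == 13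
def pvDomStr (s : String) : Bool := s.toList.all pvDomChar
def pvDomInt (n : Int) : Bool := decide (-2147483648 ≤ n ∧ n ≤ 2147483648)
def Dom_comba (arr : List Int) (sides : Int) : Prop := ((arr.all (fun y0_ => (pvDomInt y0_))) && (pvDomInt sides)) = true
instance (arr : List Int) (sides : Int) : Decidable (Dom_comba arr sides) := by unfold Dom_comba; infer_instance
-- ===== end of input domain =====

-- B replaces A's per-index base-n digit decoding with a layer-by-layer Cartesian
-- product (simpler); Pre_ excludes negative sides, where A raises or both values are accidental.


-- ===== PORT A =====
-- int(n ** sides): for 0 ≤ sides this is n^sides; for sides < 0 and n ≥ 1 Python's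
-- float power truncates to 1 (n = 1) or 0 (n ≥ 2); n = 0 with sides < 0 raises
-- ZeroDivisionError and is excluded by Pre_comba.
def comba (arr : List Int) (sides : Int) : List (List Int) :=
  let n : Int := (arr.length : Int)
  let cnt : Nat := if 0 ≤ sides then arr.length ^ sides.toNat
                   else (if arr.length = 1 then 1 else 0)
  (List.range cnt).foldl (fun res (i : Nat) =>
    let p := (List.range sides.toNat).foldl
      (fun (st : List Int × Int) _ =>
        (st.1 ++ [PySem.List.pyGetD arr (PySem.Int.mod st.2 n) 0], PySem.Int.floordiv st.2 n))
      ([], (i : Int))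
    res ++ [p.1]) []

-- ===== PORT B =====
def comba_alt (arr : List Int) (sides : Int) : List (List Int) :=
  (List.range sides.toNat).foldl
    (fun res _ => res.flatMap (fun seq => arr.map (fun x => x :: seq))) [[]]

-- ===== PRECONDITION & SPEC =====
-- Pre_ excludes negative sides: there A raises ZeroDivisionError when arr = [], and otherwise
-- A's value ([] or [[]], from int() truncating a float power) and B's ([[]], the empty product)
-- are both accidental corner values no caller would specify.
def Pre_comba (arr : List Int) (sides : Int) : Prop := 0 ≤ sides
instance (arr : List Int) (sides : Int) : Decidable (Pre_comba arr sides) := by unfold Pre_comba; infer_instance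
def pvWitness_comba : List Int × Int := ([1, 2], 2)

def Spec_comba (arr : List Int) (sides : Int) (out : List (List Int)) : Prop := out = comba_alt arr sides
instance (arr : List Int) (sides : Int) (out : List (List Int)) : Decidable (Spec_comba arr sides out) := by unfold Spec_comba; infer_instance

-- ===== CLAIM =====
def Claim_equal_comba : Prop := ∀ (arr : List Int) (sides : Int), Dom_comba arr sides → Pre_comba arr sides → Spec_comba arr sides (comba arr sides)

-- ===== LEMMAS AND PROOFS =====

-- the base-n digits of t, least significant first, looked up in arr (A's inner loop value)
def pvDigits (arr : List Int) : Nat → Int → List Int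
  | 0, _ => []
  | k+1, t => PySem.List.pyGetD arr (PySem.Int.mod t (arr.length : Int)) 0 ::
              pvDigits arr k (PySem.Int.floordiv t (arr.length : Int))

theorem pv_inner_eq (arr : List Int) :
    ∀ (l : List Nat) (acc : List Int) (t : Int),
      (l.foldl (fun (st : List Int × Int) _ =>
          (st.1 ++ [PySem.List.pyGetD arr (PySem.Int.mod st.2 (arr.length : Int)) 0],
           PySem.Int.floordiv st.2 (arr.length : Int))) (acc, t)).1
        = acc ++ pvDigits arr l.length t := by
  intro l
  induction l with
  | nil => intro acc t; simp [pvDigits]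
  | cons a l ih =>
      intro acc t
      simp only [List.foldl_cons, List.length_cons, pvDigits, ih]
      simp

theorem pv_range_mul (M n : Nat) :
    List.range (M * n) = (List.range M).flatMap (fun r => (List.range n).map (fun d => r * n + d)) := by
  induction M with
  | zero => simp
  | succ M ih =>
      have : (M + 1) * n = M * n + n := by ring
      rw [this, List.range_add, List.range_succ, List.flatMap_append, ← ih]
      simp

theorem pv_getD_map_range (arr : List Int) :
    (List.range arr.length).map (fun d => arr.getD d 0) = arr := by
  apply List.ext_getElem
  · simp
  · intro i h1 h2
    simp [List.getD_eq_getElem?_getD, List.getElem?_eq_getElem h2]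

theorem pv_map_cons (arr : List Int) (s : List Int) :
    (List.range arr.length).map (fun d => arr.getD d 0 :: s) = arr.map (fun x => x :: s) := by
  conv_rhs => rw [← pv_getD_map_range arr]
  rw [List.map_map]
  rfl

theorem pv_map_digits_succ (arr : List Int) (k : Nat) :
    (List.range (arr.length ^ (k + 1))).map (fun (i : Nat) => pvDigits arr (k + 1) (i : Int))
      = ((List.range (arr.length ^ k)).map (fun (i : Nat) => pvDigits arr k (i : Int))).flatMap
          (fun seq => arr.map (fun x => x :: seq)) := by
  rcases Nat.eq_zero_or_pos arr.length with h0 | hpos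
  · have harr : arr = [] := List.length_eq_zero_iff.mp h0
    subst harr; simp
  · rw [pow_succ, pv_range_mul, List.map_flatMap, List.flatMap_map]
    apply List.flatMap_congr  -- pointwise on r ∈ range (n^k)
    intro r _
    rw [List.map_map]
    refine Eq.trans (List.map_congr_left ?_) (pv_map_cons arr (pvDigits arr k (r : Int)))
    intro d hd
    have hd' : d < arr.length := List.mem_range.mp hd
    have hmod : (r * arr.length + d) % arr.length = d % arr.length := by
      rw [Nat.mul_comm, Nat.mul_add_mod]
    have hdiv : (r * arr.length + d) / arr.length = r := by
      rw [Nat.mul_comm, Nat.mul_add_div hpos, Nat.div_eq_of_lt hd']; omega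
    simp only [Function.comp, pvDigits, PySem.Int.mod_natCast, PySem.Int.floordiv_natCast,
      hmod, Nat.mod_eq_of_lt hd', hdiv, PySem.List.pyGetD_natCast]

theorem pv_eq_of_nonneg (arr : List Int) (sides : Int) (h : 0 ≤ sides) :
    comba arr sides = comba_alt arr sides := by
  unfold comba comba_alt
  simp only [if_pos h]
  rw [PySem.List.foldl_append_singleton_eq_map]
  simp only [List.nil_append]
  have key : ∀ k : Nat,
      (List.range (arr.length ^ k)).map (fun (i : Nat) =>
        ((List.range k).foldl (fun (st : List Int × Int) _ =>
          (st.1 ++ [PySem.List.pyGetD arr (PySem.Int.mod st.2 (arr.length : Int)) 0],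
           PySem.Int.floordiv st.2 (arr.length : Int))) ([], (i : Int))).1)
      = (List.range k).foldl
          (fun res _ => res.flatMap (fun seq => arr.map (fun x => x :: seq))) [[]] := by
    intro k
    have digit_form : ∀ k : Nat,
        (List.range (arr.length ^ k)).map (fun (i : Nat) => pvDigits arr k (i : Int))
          = (List.range k).foldl
              (fun res _ => res.flatMap (fun seq => arr.map (fun x => x :: seq))) [[]] := by
      intro k
      induction k with
      | zero => simp [pvDigits]
      | succ k ih =>
          rw [pv_map_digits_succ, ih, List.range_succ, List.foldl_append]
          simp
    have := digit_form k
    simpa [pv_inner_eq arr (List.range k)] using this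
  exact key sides.toNat

-- ===== VERDICT =====
theorem comba_spec : Claim_equal_comba := by
  intro arr sides _ hpre
  exact pv_eq_of_nonneg arr sides hpre
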